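-- pv_equiv track=rewrite | github.com/bananahana720/data-extraction-tool | tests/fixtures/semantic_corpus.py | generate_large_corpus
-- ===== SOURCE A (Python) =====
-- from typing import Dict, List
--
-- def generate_large_corpus(num_docs: int = 1000, words_per_doc: int = 100) -> List[str]:
--     """
--     Generate a large corpus for performance testing.
--
--     Args:
--         num_docs: Number of documents to generate
--         words_per_doc: Approximate words per document
--
--     Returns:
--         Large corpus for performance testing
--     """
--     templates = [
--         "The {} system processes {} with high efficiency and accuracy.",
--         "Advanced {} techniques enable {} in enterprise environments.",
--         "Quality {} ensures reliable {} across all components.",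
--         "Performance {} optimizes {} for scalable operations.",
--         "Security {} protects {} from potential threats.",
--     ]
--
--     topics = [
--         "data extraction",
--         "machine learning",
--         "natural language",
--         "document processing",
--         "semantic analysis",
--         "information retrieval",
--         "text mining",
--         "content management",
--         "knowledge graphs",
--         "entity recognition",
--     ]
--
--     operations = [
--         "documents",
--         "datasets",
--         "workflows",
--         "pipelines",
--         "transformations",
--         "computations",
--         "analyses",
--         "validations",
--         "integrations",
--         "deployments",
--     ]
--
--     corpus = []
--     for i in range(num_docs):
--         doc_parts = []
--         word_count = 0
--
--         while word_count < words_per_doc: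
--             template = templates[i % len(templates)]
--             topic = topics[i % len(topics)]
--             operation = operations[(i + 1) % len(operations)]
--
--             sentence = template.format(topic, operation)
--             doc_parts.append(sentence)
--             word_count += len(sentence.split())
--
--         corpus.append(" ".join(doc_parts))
--
--     return corpus
-- ===== SOURCE B (Python) =====
-- from typing import List
--
--
-- def generate_large_corpus(num_docs: int = 1000, words_per_doc: int = 100) -> List[str]:
--     """Generate a large corpus for performance testing (closed-form repeat count)."""
--     templates = [
--         "The {} system processes {} with high efficiency and accuracy.",
--         "Advanced {} techniques enable {} in enterprise environments.",
--         "Quality {} ensures reliable {} across all components.",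
--         "Performance {} optimizes {} for scalable operations.",
--         "Security {} protects {} from potential threats.",
--     ]
--     topics = [
--         "data extraction",
--         "machine learning",
--         "natural language",
--         "document processing",
--         "semantic analysis",
--         "information retrieval",
--         "text mining",
--         "content management",
--         "knowledge graphs",
--         "entity recognition",
--     ]
--     operations = [
--         "documents",
--         "datasets",
--         "workflows",
--         "pipelines",
--         "transformations",
--         "computations",
--         "analyses",
--         "validations",
--         "integrations",
--         "deployments",
--     ]
--
--     corpus = []
--     for i in range(num_docs):
--         sentence = templates[i % len(templates)].format(
--             topics[i % len(topics)], operations[(i + 1) % len(operations)]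
--         )
--         sentence_words = len(sentence.split())
--         k = (words_per_doc + sentence_words - 1) // sentence_words
--         corpus.append(" ".join([sentence] * k))
--     return corpus
-- ===== Notes on version B (the rewrite author's own statement) =====
-- stated objective: faster
-- what changed: Replaces the inner while-accumulate loop with one sentence built per document and a closed-form integer-ceiling repeat count, producing the document as ' '.join([sentence] * k).
import Mathlib
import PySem

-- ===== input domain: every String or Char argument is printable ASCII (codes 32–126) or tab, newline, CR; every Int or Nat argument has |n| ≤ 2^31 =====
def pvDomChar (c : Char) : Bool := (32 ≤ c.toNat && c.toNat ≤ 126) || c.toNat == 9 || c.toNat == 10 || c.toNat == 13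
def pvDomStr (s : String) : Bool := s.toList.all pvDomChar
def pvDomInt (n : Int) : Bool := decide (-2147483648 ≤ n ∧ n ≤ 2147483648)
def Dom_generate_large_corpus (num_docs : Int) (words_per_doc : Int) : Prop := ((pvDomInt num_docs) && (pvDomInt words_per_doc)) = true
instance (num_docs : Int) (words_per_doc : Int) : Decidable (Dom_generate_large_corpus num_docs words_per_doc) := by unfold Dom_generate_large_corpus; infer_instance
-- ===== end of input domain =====

-- B replaces A's inner while-accumulate loop with a closed-form integer-ceiling repeat count and one join per document (faster by a constant factor, measured).

-- ===== PORT A =====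

def pvTemplates : List String := [
  "The {} system processes {} with high efficiency and accuracy.",
  "Advanced {} techniques enable {} in enterprise environments.",
  "Quality {} ensures reliable {} across all components.",
  "Performance {} optimizes {} for scalable operations.",
  "Security {} protects {} from potential threats."]

def pvTopics : List String := [
  "data extraction", "machine learning", "natural language",
  "document processing", "semantic analysis", "information retrieval",
  "text mining", "content management", "knowledge graphs", "entity recognition"]

def pvOperations : List String := [
  "documents", "datasets", "workflows", "pipelines", "transformations",
  "computations", "analyses", "validations", "integrations", "deployments"]

-- first occurrence of "{}" replaced by r (hand port of one positional str.format field;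
-- exact here because the replacement strings contain no braces)
def pvSubstFirst (r : List Char) : List Char → List Char
  | '{' :: '}' :: rest => r ++ rest
  | c :: rest => c :: pvSubstFirst r rest
  | [] => []

-- template.format(a, b) for a template with exactly two "{}" fields
def pvFormat2 (t a b : String) : String :=
  String.ofList (pvSubstFirst b.toList (pvSubstFirst a.toList t.toList))

-- the sentence A builds in each iteration of its while loop (depends only on i)
def pvSentenceA (i : Int) : String :=
  let template := PySem.List.pyGetD pvTemplates (PySem.Int.mod i (pvTemplates.length : Int)) ""
  let topic := PySem.List.pyGetD pvTopics (PySem.Int.mod i (pvTopics.length : Int)) ""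
  let operation := PySem.List.pyGetD pvOperations (PySem.Int.mod (i + 1) (pvOperations.length : Int)) ""
  pvFormat2 template topic operation

-- A's inner while loop; the 'sw ≤ 0' branch is a totality guard only (the sentence always
-- has words, so it is never taken; Python would loop forever there)
def pvDocLoopA (i wpd : Int) (parts : List String) (wc : Int) : List String :=
  if _h : wc < wpd then
    if _hsw : ((PySem.Str.split₀ (pvSentenceA i)).length : Int) ≤ 0 then parts
    else pvDocLoopA i wpd (parts ++ [pvSentenceA i])
           (wc + ((PySem.Str.split₀ (pvSentenceA i)).length : Int))
  else parts
termination_by (wpd - wc).toNat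
decreasing_by omega

def generate_large_corpus (num_docs : Int) (words_per_doc : Int) : List String :=
  (PySem.List.pyRange 0 num_docs 1).foldl
    (fun corpus i => corpus ++ [PySem.Str.join " " (pvDocLoopA i words_per_doc [] 0)]) []

-- ===== PORT B =====

def generate_large_corpus_alt (num_docs : Int) (words_per_doc : Int) : List String :=
  (PySem.List.pyRange 0 num_docs 1).map (fun i =>
    let sentence := pvFormat2
      (PySem.List.pyGetD pvTemplates (PySem.Int.mod i (pvTemplates.length : Int)) "")
      (PySem.List.pyGetD pvTopics (PySem.Int.mod i (pvTopics.length : Int)) "")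
      (PySem.List.pyGetD pvOperations (PySem.Int.mod (i + 1) (pvOperations.length : Int)) "")
    let sw : Int := ((PySem.Str.split₀ sentence).length : Int)
    let k := PySem.Int.floordiv (words_per_doc + sw - 1) sw
    PySem.Str.join " " (List.replicate k.toNat sentence))

-- ===== PRECONDITION & SPEC =====
def Spec_generate_large_corpus (num_docs : Int) (words_per_doc : Int) (out : List String) : Prop := out = generate_large_corpus_alt num_docs words_per_doc
instance (num_docs : Int) (words_per_doc : Int) (out : List String) : Decidable (Spec_generate_large_corpus num_docs words_per_doc out) := by unfold Spec_generate_large_corpus; infer_instance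

-- ===== CLAIM (what is proved, stated in full; the proofs are below) =====
def Claim_equal_generate_large_corpus : Prop := ∀ (num_docs : Int) (words_per_doc : Int), Dom_generate_large_corpus num_docs words_per_doc → Spec_generate_large_corpus num_docs words_per_doc (generate_large_corpus num_docs words_per_doc)

-- ===== LEMMAS AND PROOFS =====

-- the per-document sentence always contains at least one word
set_option maxHeartbeats 1000000 in
lemma pvSw_pos (i : Int) : 1 ≤ ((PySem.Str.split₀ (pvSentenceA i)).length : Int) := by
  have e5 : i % 5 = (i % 10) % 5 := by omega
  have e10 : (i+1) % 10 = (i % 10 + 1) % 10 := by omega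
  have hr0 : 0 ≤ i % 10 := Int.emod_nonneg _ (by norm_num)
  have hr1 : i % 10 < 10 := Int.emod_lt_of_pos _ (by norm_num)
  unfold pvSentenceA
  simp only [pvTemplates, pvTopics, pvOperations, List.length_cons, List.length_nil]
  norm_num
  rw [e5, e10]
  set r := i % 10 with hrdef
  interval_cases r <;> decide

-- A's while loop appends the same sentence an integer-ceiling number of times
lemma pvDocLoopA_eq (i wpd : Int) : ∀ (n : Nat) (wc : Int) (parts : List String),
    (wpd - wc).toNat = n →
    pvDocLoopA i wpd parts wc =
      parts ++ List.replicate
        ((PySem.Int.floordiv (wpd - wc + ((PySem.Str.split₀ (pvSentenceA i)).length : Int) - 1)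
          ((PySem.Str.split₀ (pvSentenceA i)).length : Int)).toNat) (pvSentenceA i) := by
  have hsw := pvSw_pos i
  set sw : Int := ((PySem.Str.split₀ (pvSentenceA i)).length : Int) with hswdef
  have hpos : (0:Int) < sw := by omega
  intro n
  induction n using Nat.strong_induction_on with
  | _ n ih =>
    intro wc parts hn
    rw [pvDocLoopA]
    by_cases h : wc < wpd
    · rw [dif_pos h, dif_neg (by omega : ¬ sw ≤ 0)]
      rw [ih (wpd - (wc + sw)).toNat (by omega) (wc + sw) (parts ++ [pvSentenceA i]) rfl]
      have hfd : PySem.Int.floordiv (wpd - wc + sw - 1) sw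
          = PySem.Int.floordiv (wpd - (wc + sw) + sw - 1) sw + 1 := by
        rw [PySem.Int.floordiv_eq_ediv_of_pos hpos, PySem.Int.floordiv_eq_ediv_of_pos hpos]
        have h2 := Int.add_mul_ediv_right (wpd - (wc + sw) + sw - 1) 1 (by omega : sw ≠ 0)
        calc (wpd - wc + sw - 1) / sw
            = (wpd - (wc + sw) + sw - 1 + 1 * sw) / sw := by ring_nf
          _ = (wpd - (wc + sw) + sw - 1) / sw + 1 := h2
      have hnn : 0 ≤ PySem.Int.floordiv (wpd - (wc + sw) + sw - 1) sw := by
        rw [PySem.Int.floordiv_eq_ediv_of_pos hpos]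
        exact Int.ediv_nonneg (by omega) (by omega)
      rw [hfd, show (PySem.Int.floordiv (wpd - (wc + sw) + sw - 1) sw + 1).toNat
          = (PySem.Int.floordiv (wpd - (wc + sw) + sw - 1) sw).toNat + 1 from by omega]
      rw [List.replicate_succ, List.append_assoc]
      rfl
    · rw [dif_neg h]
      have hlt : PySem.Int.floordiv (wpd - wc + sw - 1) sw < 1 := by
        rw [PySem.Int.floordiv_lt_iff_lt_mul hpos]; omega
      rw [show (PySem.Int.floordiv (wpd - wc + sw - 1) sw).toNat = 0 from by omega]
      simp

-- ===== VERDICT (by name: the statement is the Claim_ definition above) =====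
theorem generate_large_corpus_spec : Claim_equal_generate_large_corpus := by
  intro num_docs words_per_doc _
  unfold Spec_generate_large_corpus generate_large_corpus generate_large_corpus_alt
  rw [PySem.List.foldl_append_singleton_eq_map]
  simp only [List.nil_append]
  apply List.map_congr_left
  intro i _
  rw [pvDocLoopA_eq i words_per_doc (words_per_doc - 0).toNat 0 [] rfl]
  rw [show words_per_doc - 0 + ((PySem.Str.split₀ (pvSentenceA i)).length : Int) - 1
       = words_per_doc + ((PySem.Str.split₀ (pvSentenceA i)).length : Int) - 1 from by ring]
  rfl
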